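-- pv_equiv track=rewrite | github.com/Kaligo812/IP | guias/guia7/guia7.py | pos_secuencia_ordenada_mas_larga
-- ===== SOURCE A (Python) =====
-- def suma_total(lista: list[int]) -> int:
--     suma: int = 0
--
--     for elemento in lista:
--         suma += elemento
--
--     return suma
--
-- def maximo(lista: list[int]) -> int:
--     mayor: int = lista[0] # asumo que lista no esta vacia
--
--     for i in range(1,len(lista)):
--         if (lista[i] > mayor): mayor = lista[i]
--
--     return mayor
--
-- def subsecuencias_ordenadas(s: list[int]) -> list[int]:
--     if (len(s) == 0):
--         return [0]
--
--     cant_nums_ordenados: int = 1 # asumo que s no esta vacia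
--     i: int = 1
--
--     while (i < len(s)):
--         if (s[i - 1] <= s[i]):
--             cant_nums_ordenados += 1
--         else:
--             break
--
--         i += 1
--
--     return [cant_nums_ordenados] + subsecuencias_ordenadas(s[i:])
--
-- def pos_secuencia_ordenada_mas_larga(s: list[int]) -> int:
--     tamanio_de_secuencias_ordenadas: list[int] = subsecuencias_ordenadas(s)
--     max_tamanio: int = maximo(tamanio_de_secuencias_ordenadas)
--     indice: int = 0
--
--     for i in range(len(tamanio_de_secuencias_ordenadas)):
--         if (tamanio_de_secuencias_ordenadas[i] == max_tamanio):
--             indice = suma_total(tamanio_de_secuencias_ordenadas[:i])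
--             break
--
--
--     return indice
-- ===== SOURCE B (Python) =====
-- def pos_secuencia_ordenada_mas_larga(s: list[int]) -> int:
--     n = len(s)
--     best_pos = 0
--     best_len = 0
--     i = 0
--     while i < n:
--         start = i
--         i += 1
--         while i < n and s[i - 1] <= s[i]:
--             i += 1
--         if i - start > best_len:
--             best_len = i - start
--             best_pos = start
--     return best_pos
-- ===== Notes on version B (the rewrite author's own statement) =====
-- stated objective: faster
-- what changed: B replaces A's recursive construction of the full run-length list (with list slicing, a separate max pass, and prefix-sum rescans) by a single iterative index scan that tracks the current run and the first-seen best run start.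
import Mathlib
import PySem

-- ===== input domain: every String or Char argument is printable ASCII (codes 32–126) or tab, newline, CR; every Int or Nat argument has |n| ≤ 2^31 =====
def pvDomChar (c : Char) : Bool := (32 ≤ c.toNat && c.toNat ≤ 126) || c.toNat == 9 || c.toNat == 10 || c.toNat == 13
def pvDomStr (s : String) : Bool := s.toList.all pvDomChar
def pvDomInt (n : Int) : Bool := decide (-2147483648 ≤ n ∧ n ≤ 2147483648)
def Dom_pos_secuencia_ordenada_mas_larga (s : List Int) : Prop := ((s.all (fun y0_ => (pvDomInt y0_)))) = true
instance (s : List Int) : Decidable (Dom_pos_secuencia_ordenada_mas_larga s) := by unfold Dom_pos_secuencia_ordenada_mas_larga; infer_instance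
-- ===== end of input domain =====

-- B is a single O(n) index scan instead of A's O(n^2) recursive run-length list + max + prefix-sum rescans; same return value everywhere.

-- ===== PORT A =====
-- suma_total: for elemento in lista: suma += elemento
def pvSuma (lista : List Int) : Int := lista.foldl (fun suma elemento => suma + elemento) 0

-- maximo: mayor = lista[0]; for i in range(1,len): if lista[i] > mayor: mayor = lista[i].
-- Iterating i over range(1,len) reading lista[i] is exactly a fold over the tail; A only
-- calls it on nonempty lists (result of subsecuencias_ordenadas), the [] branch is unreachable.
def pvMaximo (lista : List Int) : Int :=
  match lista with
  | [] => 0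
  | x :: xs => xs.foldl (fun mayor y => if mayor < y then y else mayor) x

-- the inner while of subsecuencias_ordenadas: counts while s[i-1] <= s[i] (prev passed along)
def pvCnt : Int → List Int → Nat
  | _, [] => 0
  | p, y :: ys => if p ≤ y then 1 + pvCnt y ys else 0

-- subsecuencias_ordenadas: length of first non-decreasing run, then recurse on s[i:]
def pvSubsecs : List Int → List Int
  | [] => [(0 : Int)]
  | x :: xs =>
      ((1 + pvCnt x xs : Nat) : Int) :: pvSubsecs (xs.drop (pvCnt x xs))
termination_by s => s.length
decreasing_by simp

-- the final for-loop with break: first i with L[i] == max, indice = suma_total(L[:i])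
-- (pre accumulates L[:i]); if no match, indice keeps its initial 0
def pvFindA : List Int → Int → List Int → Int
  | [], _, _ => 0
  | y :: ys, mx, pre => if y = mx then pvSuma pre else pvFindA ys mx (pre ++ [y])

def pos_secuencia_ordenada_mas_larga (s : List Int) : Int :=
  let tam := pvSubsecs s
  pvFindA tam (pvMaximo tam) []

-- ===== PORT B =====
-- outer while of Source B: consume one run (inner while = pvCnt, the same scan Source B's inner
-- while performs), advance pos, keep the first best (strict improvement only)
def pvLoopB : List Int → Nat → Nat → Nat → Nat
  | [], _, best_pos, _ => best_pos
  | x :: xs, pos, best_pos, best_len =>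
      let k := 1 + pvCnt x xs
      if best_len < k then pvLoopB (xs.drop (pvCnt x xs)) (pos + k) pos k
      else pvLoopB (xs.drop (pvCnt x xs)) (pos + k) best_pos best_len
termination_by s => s.length
decreasing_by all_goals simp

def pos_secuencia_ordenada_mas_larga_alt (s : List Int) : Int :=
  ((pvLoopB s 0 0 0 : Nat) : Int)

-- ===== PRECONDITION & SPEC =====
def Spec_pos_secuencia_ordenada_mas_larga (s : List Int) (out : Int) : Prop := out = pos_secuencia_ordenada_mas_larga_alt s
instance (s : List Int) (out : Int) : Decidable (Spec_pos_secuencia_ordenada_mas_larga s out) := by unfold Spec_pos_secuencia_ordenada_mas_larga; infer_instance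

-- ===== CLAIM (what is proved, stated in full; the proofs are below) =====
def Claim_equal_pos_secuencia_ordenada_mas_larga : Prop := ∀ (s : List Int), Dom_pos_secuencia_ordenada_mas_larga s → Spec_pos_secuencia_ordenada_mas_larga s (pos_secuencia_ordenada_mas_larga s)

-- ===== LEMMAS AND PROOFS =====

-- reference value: (start index, length) of the first longest non-decreasing run
def pvAns : List Int → Nat × Nat
  | [] => (0, 0)
  | x :: xs =>
      let k := 1 + pvCnt x xs
      let p := pvAns (xs.drop (pvCnt x xs))
      if p.2 ≤ k then (0, k) else (k + p.1, p.2)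
termination_by s => s.length
decreasing_by simp

theorem pvLoopB_char_aux : ∀ (n : Nat) (s : List Int), s.length ≤ n →
    ∀ pos bp bl, pvLoopB s pos bp bl = if bl < (pvAns s).2 then pos + (pvAns s).1 else bp := by
  intro n
  induction n with
  | zero =>
      intro s hs pos bp bl
      have hnil : s = [] := List.eq_nil_of_length_eq_zero (Nat.le_zero.1 hs)
      subst hnil
      rw [pvLoopB, pvAns]
      simp
  | succ n ih =>
      intro s hs pos bp bl
      cases s with
      | nil => rw [pvLoopB, pvAns]; simp
      | cons x xs =>
          rw [pvLoopB, pvAns]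
          have hlen : (xs.drop (pvCnt x xs)).length ≤ n := by
            simp only [List.length_cons] at hs
            simp only [List.length_drop]
            omega
          simp only [ih _ hlen]
          by_cases h2 : (pvAns (xs.drop (pvCnt x xs))).2 ≤ 1 + pvCnt x xs <;>
            split_ifs <;> simp_all <;> omega

theorem pvLoopB_char (s : List Int) (pos bp bl : Nat) :
    pvLoopB s pos bp bl = if bl < (pvAns s).2 then pos + (pvAns s).1 else bp :=
  pvLoopB_char_aux s.length s (Nat.le_refl _) pos bp bl

theorem pvAns_pos (s : List Int) : (pvAns s).2 = 0 → (pvAns s).1 = 0 := by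
  cases s with
  | nil => rw [pvAns]; simp
  | cons x xs =>
      rw [pvAns]
      split_ifs with h <;> intro h2 <;> simp_all

theorem pvMaximo_step : (fun mayor y => if mayor < y then y else mayor) = (max : Int → Int → Int) := by
  funext a b
  rcases lt_or_ge a b with h | h
  · simp [h, max_eq_right h.le]
  · simp [not_lt.2 h, max_eq_left h]

theorem foldl_max_shift : ∀ (T : List Int) (a b : Int),
    T.foldl max (max a b) = max a (T.foldl max b) := by
  intro T
  induction T with
  | nil => simp
  | cons y ys ih => intro a b; simp only [List.foldl, max_assoc, ih]

theorem pvMaximo_cons (a : Int) (T : List Int) (hT : T ≠ []) :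
    pvMaximo (a :: T) = max a (pvMaximo T) := by
  cases T with
  | nil => simp at hT
  | cons y ys =>
      rw [show pvMaximo (a :: y :: ys) = (y :: ys).foldl max a from by
            simp [pvMaximo, pvMaximo_step],
          show pvMaximo (y :: ys) = ys.foldl max y from by
            simp [pvMaximo, pvMaximo_step],
          List.foldl_cons, foldl_max_shift]

theorem pvMaximo_mem : ∀ (T : List Int), T ≠ [] → pvMaximo T ∈ T := by
  intro T
  induction T with
  | nil => simp
  | cons a t ih =>
      intro _
      cases t with
      | nil => simp [pvMaximo]
      | cons y ys =>
          rw [pvMaximo_cons a (y :: ys) (by simp)]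
          rcases max_choice a (pvMaximo (y :: ys)) with h | h
          · rw [h]; simp
          · rw [h]; exact List.mem_cons_of_mem _ (ih (by simp))

theorem pvSubsecs_ne_nil (s : List Int) : pvSubsecs s ≠ [] := by
  cases s with
  | nil => rw [pvSubsecs]; simp
  | cons x xs => rw [pvSubsecs]; simp

theorem pvFindA_shift : ∀ (T : List Int) (mx : Int), mx ∈ T →
    ∀ pre, pvFindA T mx pre = pvSuma pre + pvFindA T mx [] := by
  intro T
  induction T with
  | nil => simp
  | cons y ys ih =>
      intro mx hm pre
      by_cases h : y = mx
      · simp [pvFindA, h, pvSuma]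
      · have hm' : mx ∈ ys := (List.mem_cons.1 hm).resolve_left (fun e => h e.symm)
        simp only [pvFindA, if_neg h, List.nil_append]
        rw [ih mx hm' (pre ++ [y]), ih mx hm' [y]]
        simp [pvSuma, List.foldl_append]
        ring

theorem pvA_char : ∀ (s : List Int),
    pvMaximo (pvSubsecs s) = ((pvAns s).2 : Int) ∧
    pvFindA (pvSubsecs s) (pvMaximo (pvSubsecs s)) [] = ((pvAns s).1 : Int) := by
  intro s
  induction s using pvSubsecs.induct with
  | case1 =>
      rw [pvSubsecs, pvAns]
      simp [pvMaximo, pvFindA, pvSuma]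
  | case2 x xs ih =>
      obtain ⟨ih1, ih2⟩ := ih
      set k : Nat := 1 + pvCnt x xs with hk
      set r : List Int := xs.drop (pvCnt x xs) with hr
      have hsub : pvSubsecs (x :: xs) = ((k : Nat) : Int) :: pvSubsecs r := by
        rw [pvSubsecs]
      have hansp : pvAns (x :: xs) =
          if (pvAns r).2 ≤ k then (0, k) else (k + (pvAns r).1, (pvAns r).2) := by
        rw [pvAns]
      have hmax : pvMaximo (pvSubsecs (x :: xs)) = max ((k : Nat) : Int) ((pvAns r).2 : Int) := by
        rw [hsub, pvMaximo_cons _ _ (pvSubsecs_ne_nil r), ih1]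
      by_cases hc : (pvAns r).2 ≤ k
      · -- first run is (weakly) longest: answer 0
        have hmx : pvMaximo (pvSubsecs (x :: xs)) = ((k : Nat) : Int) := by
          rw [hmax, max_eq_left (by exact_mod_cast hc)]
        constructor
        · rw [hmx, hansp, if_pos hc]
        · rw [hmx, hsub]
          simp [pvFindA, pvSuma, hansp, hc]
      · -- a later run is strictly longer
        have hk2 : (((k : Nat) : Int)) ≤ ((pvAns r).2 : Int) := by
          exact_mod_cast Nat.le_of_lt (Nat.lt_of_not_le hc)
        have hmx : pvMaximo (pvSubsecs (x :: xs)) = ((pvAns r).2 : Int) := by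
          rw [hmax, max_eq_right hk2]
        constructor
        · rw [hmx, hansp, if_neg hc]
        · rw [hmx, hsub]
          have hne : ((k : Nat) : Int) ≠ ((pvAns r).2 : Int) := by
            intro h
            exact absurd (Nat.cast_injective h) (by omega)
          simp only [pvFindA, if_neg hne, List.nil_append]
          rw [pvFindA_shift (pvSubsecs r) _
                (by rw [← ih1]; exact pvMaximo_mem _ (pvSubsecs_ne_nil r)) [((k : Nat) : Int)],
              ← ih1, ih2, hansp, if_neg hc]
          simp [pvSuma]

-- ===== VERDICT (by name: the statement is the Claim_ definition above) =====
theorem pos_secuencia_ordenada_mas_larga_spec : Claim_equal_pos_secuencia_ordenada_mas_larga := by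
  intro s _
  unfold Spec_pos_secuencia_ordenada_mas_larga pos_secuencia_ordenada_mas_larga pos_secuencia_ordenada_mas_larga_alt
  rw [(pvA_char s).2, pvLoopB_char s 0 0 0]
  rcases Nat.eq_zero_or_pos (pvAns s).2 with h | h
  · simp [h, pvAns_pos s h]
  · simp [h]
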